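-- pv_equiv track=rewrite | github.com/dedalosl/bde_xbrl_editor | src/bde_xbrl_editor/validation/formula/static.py | _period_variable_refs
-- ===== SOURCE A (Python) =====
-- def _period_variable_refs(expr: str) -> set[str]:
--     refs: set[str] = set()
--     needle = "xfi:period($"
--     start = 0
--     while True:
--         index = expr.find(needle, start)
--         if index < 0:
--             return refs
--         name_start = index + len(needle)
--         name_end = expr.find(")", name_start)
--         if name_end < 0:
--             return refs
--         refs.add(expr[name_start:name_end].strip())
--         start = name_end + 1
-- ===== SOURCE B (Python) =====
-- def _period_variable_refs(expr: str) -> set[str]: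
--     """Scan by partitioning off suffixes instead of tracking find() indices."""
--     refs: set[str] = set()
--     rest = expr
--     while True:
--         _, sep, rest = rest.partition("xfi:period($")
--         if not sep:
--             return refs
--         name, sep, rest = rest.partition(")")
--         if not sep:
--             return refs
--         refs.add(name.strip())
-- ===== Notes on version B (the rewrite author's own statement) =====
-- stated objective: idiomatic
-- what changed: Replaces the find()/start-index bookkeeping over the whole string with str.partition on ever-shorter suffixes: each step splits off everything up to the needle, then splits the remainder at the first closing parenthesis, carrying only the suffix forward.
import Mathlib
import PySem

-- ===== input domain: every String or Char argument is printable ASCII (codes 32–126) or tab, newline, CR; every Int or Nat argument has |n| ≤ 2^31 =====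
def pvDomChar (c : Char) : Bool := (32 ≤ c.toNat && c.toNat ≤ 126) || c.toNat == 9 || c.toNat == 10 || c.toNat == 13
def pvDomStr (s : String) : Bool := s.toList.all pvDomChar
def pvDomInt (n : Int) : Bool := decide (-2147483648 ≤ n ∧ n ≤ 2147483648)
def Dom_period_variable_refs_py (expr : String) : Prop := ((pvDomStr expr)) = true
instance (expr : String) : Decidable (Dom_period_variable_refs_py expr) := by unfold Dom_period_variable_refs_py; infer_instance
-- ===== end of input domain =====

-- B replaces A's find()/start-index bookkeeping with str.partition on ever-shorter suffixes; same cost, the claim is about the returned set.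

-- ===== PORT A =====
-- A's locals `index`, `name_start`, `name_end` as helper defs over the same findFrom calls
def pvNeedle : List Char := "xfi:period($".toList
def pvIndex (expr : List Char) (start : Nat) : Int :=
  PySem.Chars.findFrom expr pvNeedle (start : Int) none
def pvNameStart (expr : List Char) (start : Nat) : Int :=
  pvIndex expr start + (pvNeedle.length : Int)
def pvNameEnd (expr : List Char) (start : Nat) : Int :=
  PySem.Chars.findFrom expr [')'] (pvNameStart expr start) none

theorem pvFindFromFacts (s sub : List Char) (k : Nat) (hk : k ≤ s.length) (hsub : sub ≠ [])
    (h : ¬ PySem.Chars.findFrom s sub (k : Int) < 0) :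
    k ≤ (PySem.Chars.findFrom s sub (k : Int)).toNat ∧
      (PySem.Chars.findFrom s sub (k : Int)).toNat + sub.length ≤ s.length := by
  have hne : PySem.Chars.findFrom s sub (k : Int) ≠ -1 := by omega
  obtain ⟨h1, h2, -⟩ := PySem.Chars.findFrom_natCast_spec s sub k hk hne
  have hlen := h2.length_le
  rw [List.length_drop] at hlen
  have hpos : 0 < sub.length := List.length_pos_of_ne_nil hsub
  omega

theorem pvA_next (expr : List Char) (start : Nat) (hstart : start ≤ expr.length)
    (h1 : ¬ pvIndex expr start < 0) (h2 : ¬ pvNameEnd expr start < 0) :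
    (pvNameEnd expr start).toNat + 1 ≤ expr.length ∧ start < (pvNameEnd expr start).toNat + 1 := by
  unfold pvNameEnd pvNameStart pvIndex at *
  have hf := pvFindFromFacts expr pvNeedle start hstart (by decide) h1
  have hcast : PySem.Chars.findFrom expr pvNeedle (start : Int) none + (pvNeedle.length : Int)
      = (((PySem.Chars.findFrom expr pvNeedle (start : Int) none).toNat + pvNeedle.length : Nat) : Int) := by
    push_cast; omega
  rw [hcast] at h2 ⊢
  have hs2 : (PySem.Chars.findFrom expr pvNeedle (start : Int) none).toNat + pvNeedle.length ≤ expr.length := by omega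
  have hf2 := pvFindFromFacts expr [')'] _ hs2 (by decide) h2
  simp only [List.length_cons, List.length_nil] at hf2
  have hL : 0 < pvNeedle.length := by decide
  omega

def pvALoop (expr : List Char) (start : Nat) (refs : PySem.Set String)
    (hstart : start ≤ expr.length) : PySem.Set String :=
  if h1 : pvIndex expr start < 0 then refs
  else if h2 : pvNameEnd expr start < 0 then refs
  else
    pvALoop expr ((pvNameEnd expr start).toNat + 1)
      (PySem.Set.add refs (String.ofList (PySem.Chars.strip
        (PySem.List.slice expr (some (pvNameStart expr start)) (some (pvNameEnd expr start))))))
      (pvA_next expr start hstart h1 h2).1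
termination_by expr.length + 1 - start
decreasing_by
  have h := pvA_next expr start hstart h1 h2
  omega

def period_variable_refs_py (expr : String) : List String :=
  pvALoop expr.toList 0 PySem.Set.empty (Nat.zero_le _)

-- ===== PORT B =====
-- str.partition(sub) = (head, sub, tail) at the first occurrence, or (s, '', '') if absent
def pvPartition (s sub : List Char) : List Char × List Char × List Char :=
  let i := PySem.Chars.find s sub
  if i < 0 then (s, [], [])
  else (s.take i.toNat, sub, s.drop (i.toNat + sub.length))

theorem pvPartition_neg (s sub : List Char) (h : PySem.Chars.find s sub < 0) :
    pvPartition s sub = (s, [], []) := by simp [pvPartition, h]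

theorem pvPartition_pos (s sub : List Char) (h : ¬ PySem.Chars.find s sub < 0) :
    pvPartition s sub = (s.take (PySem.Chars.find s sub).toNat, sub,
      s.drop ((PySem.Chars.find s sub).toNat + sub.length)) := by simp [pvPartition, h]

theorem pvFindFacts (s sub : List Char) (hsub : sub ≠ []) (h : ¬ PySem.Chars.find s sub < 0) :
    (PySem.Chars.find s sub).toNat + sub.length ≤ s.length := by
  obtain ⟨hpre, -⟩ := PySem.Chars.find_spec (s := s) (sub := sub) (by omega)
  have hlen := hpre.length_le
  rw [List.length_drop] at hlen
  have hpos : 0 < sub.length := List.length_pos_of_ne_nil hsub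
  have hle := PySem.Chars.find_le_length s sub
  omega

theorem pvPartitionShrink (s : List Char)
    (h1 : ¬ (pvPartition s pvNeedle).2.1.isEmpty = true)
    (h2 : ¬ (pvPartition (pvPartition s pvNeedle).2.2 [')']).2.1.isEmpty = true) :
    (pvPartition (pvPartition s pvNeedle).2.2 [')']).2.2.length < s.length := by
  have hi : ¬ PySem.Chars.find s pvNeedle < 0 := by
    intro hlt; rw [pvPartition_neg s pvNeedle hlt] at h1; simp at h1
  rw [pvPartition_pos s pvNeedle hi] at h2 ⊢
  have hfa := pvFindFacts s pvNeedle (by decide) hi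
  have hj : ¬ PySem.Chars.find (s.drop ((PySem.Chars.find s pvNeedle).toNat + pvNeedle.length)) [')'] < 0 := by
    intro hlt; rw [pvPartition_neg _ _ hlt] at h2; simp at h2
  rw [pvPartition_pos _ _ hj]
  simp only [List.length_drop, List.length_cons, List.length_nil]
  have hL : 0 < pvNeedle.length := by decide
  omega

def pvBLoop (s : List Char) (refs : PySem.Set String) : PySem.Set String :=
  let p := pvPartition s pvNeedle
  if h1 : p.2.1.isEmpty then refs
  else
    let q := pvPartition p.2.2 [')']
    if h2 : q.2.1.isEmpty then refs
    else pvBLoop q.2.2 (PySem.Set.add refs (String.ofList (PySem.Chars.strip q.1)))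
termination_by s.length
decreasing_by exact pvPartitionShrink s h1 h2
def period_variable_refs_py_alt (expr : String) : List String :=
  pvBLoop expr.toList PySem.Set.empty

-- ===== PRECONDITION & SPEC =====
-- A raises on no input: Pre_ is trivially true (it only pins the needle constant the ports share) and excludes nothing.
def Pre_period_variable_refs_py (expr : String) : Prop := pvNeedle = "xfi:period($".toList
instance (expr : String) : Decidable (Pre_period_variable_refs_py expr) := by unfold Pre_period_variable_refs_py; infer_instance
def pvWitness_period_variable_refs_py : String := ("xfi:period($ a )")

def Spec_period_variable_refs_py (expr : String) (out : List String) : Prop := out = period_variable_refs_py_alt expr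
instance (expr : String) (out : List String) : Decidable (Spec_period_variable_refs_py expr out) := by unfold Spec_period_variable_refs_py; infer_instance

-- ===== CLAIM (what is proved, stated in full; the proofs are below) =====
def Claim_equal_period_variable_refs_py : Prop := ∀ (expr : String), Dom_period_variable_refs_py expr → Pre_period_variable_refs_py expr → Spec_period_variable_refs_py expr (period_variable_refs_py expr)

-- ===== LEMMAS AND PROOFS =====

theorem pv_loop_eq (expr : List Char) (start : Nat) (hstart : start ≤ expr.length)
    (refs : PySem.Set String) :
    pvALoop expr start refs hstart = pvBLoop (expr.drop start) refs := by
  have hL : 0 < pvNeedle.length := by decide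
  rw [pvALoop, pvBLoop]
  have hidx : pvIndex expr start = if PySem.Chars.find (expr.drop start) pvNeedle = -1 then -1
      else (start : Int) + PySem.Chars.find (expr.drop start) pvNeedle :=
    PySem.Chars.findFrom_natCast expr pvNeedle start hstart
  by_cases hfa : PySem.Chars.find (expr.drop start) pvNeedle < 0
  · have hm1 : PySem.Chars.find (expr.drop start) pvNeedle = -1 := by
      have := PySem.Chars.neg_one_le_find (expr.drop start) pvNeedle; omega
    rw [dif_pos (by rw [hidx, if_pos hm1]; norm_num)]
    simp only [pvPartition_neg _ _ hfa]
    rfl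
  · have hge := PySem.Chars.neg_one_le_find (expr.drop start) pvNeedle
    have hne : ¬ PySem.Chars.find (expr.drop start) pvNeedle = -1 := by omega
    have hidx' : pvIndex expr start = (start : Int) + PySem.Chars.find (expr.drop start) pvNeedle := by
      rw [hidx, if_neg hne]
    rw [dif_neg (by omega)]
    simp only [pvPartition_pos _ _ hfa]
    rw [dif_neg (show ¬ pvNeedle.isEmpty = true by decide)]
    have hfa2 := pvFindFacts (expr.drop start) pvNeedle (by decide) hfa
    rw [List.length_drop] at hfa2
    have hdd : (expr.drop start).drop ((PySem.Chars.find (expr.drop start) pvNeedle).toNat + pvNeedle.length)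
        = expr.drop (start + ((PySem.Chars.find (expr.drop start) pvNeedle).toNat + pvNeedle.length)) := by
      rw [List.drop_drop]
    have hk2 : start + ((PySem.Chars.find (expr.drop start) pvNeedle).toNat + pvNeedle.length) ≤ expr.length := by omega
    have hNS : pvNameStart expr start
        = ((start + ((PySem.Chars.find (expr.drop start) pvNeedle).toNat + pvNeedle.length) : Nat) : Int) := by
      unfold pvNameStart; rw [hidx']; push_cast; omega
    have hNE : pvNameEnd expr start
        = if PySem.Chars.find (expr.drop (start + ((PySem.Chars.find (expr.drop start) pvNeedle).toNat + pvNeedle.length))) [')'] = -1 then -1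
          else ((start + ((PySem.Chars.find (expr.drop start) pvNeedle).toNat + pvNeedle.length) : Nat) : Int)
            + PySem.Chars.find (expr.drop (start + ((PySem.Chars.find (expr.drop start) pvNeedle).toNat + pvNeedle.length))) [')'] := by
      unfold pvNameEnd; rw [hNS]
      exact PySem.Chars.findFrom_natCast expr [')'] _ hk2
    rw [hdd]
    by_cases hfb : PySem.Chars.find (expr.drop (start + ((PySem.Chars.find (expr.drop start) pvNeedle).toNat + pvNeedle.length))) [')'] < 0
    · have hm1b : PySem.Chars.find (expr.drop (start + ((PySem.Chars.find (expr.drop start) pvNeedle).toNat + pvNeedle.length))) [')'] = -1 := by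
        have := PySem.Chars.neg_one_le_find (expr.drop (start + ((PySem.Chars.find (expr.drop start) pvNeedle).toNat + pvNeedle.length))) [')']; omega
      rw [dif_pos (by rw [hNE, if_pos hm1b]; norm_num)]
      rw [pvPartition_neg _ _ hfb]
      rfl
    · have hgeb := PySem.Chars.neg_one_le_find (expr.drop (start + ((PySem.Chars.find (expr.drop start) pvNeedle).toNat + pvNeedle.length))) [')']
      have hNE' : pvNameEnd expr start
          = ((start + ((PySem.Chars.find (expr.drop start) pvNeedle).toNat + pvNeedle.length)
              + (PySem.Chars.find (expr.drop (start + ((PySem.Chars.find (expr.drop start) pvNeedle).toNat + pvNeedle.length))) [')']).toNat : Nat) : Int) := by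
        rw [hNE, if_neg (by omega)]; push_cast; omega
      rw [dif_neg (by rw [hNE']; omega)]
      rw [pvPartition_pos _ _ hfb]
      rw [dif_neg (show ¬ [')'].isEmpty = true by decide)]
      have hfb2 := pvFindFacts (expr.drop (start + ((PySem.Chars.find (expr.drop start) pvNeedle).toNat + pvNeedle.length))) [')'] (by decide) hfb
      rw [List.length_drop, List.length_cons, List.length_nil] at hfb2
      have hsl : PySem.List.slice expr (some (pvNameStart expr start)) (some (pvNameEnd expr start))
          = (expr.drop (start + ((PySem.Chars.find (expr.drop start) pvNeedle).toNat + pvNeedle.length))).take (PySem.Chars.find (expr.drop (start + ((PySem.Chars.find (expr.drop start) pvNeedle).toNat + pvNeedle.length))) [')']).toNat := by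
        rw [hNS, hNE']
        rw [show (((start + ((PySem.Chars.find (expr.drop start) pvNeedle).toNat + pvNeedle.length)) + (PySem.Chars.find (expr.drop (start + ((PySem.Chars.find (expr.drop start) pvNeedle).toNat + pvNeedle.length))) [')']).toNat : Nat) : Int)
            = (((start + ((PySem.Chars.find (expr.drop start) pvNeedle).toNat + pvNeedle.length)) : Nat) : Int) + (((PySem.Chars.find (expr.drop (start + ((PySem.Chars.find (expr.drop start) pvNeedle).toNat + pvNeedle.length))) [')']).toNat : Nat) : Int) by push_cast; ring]
        rw [PySem.List.slice_natCast_add]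
      have hstart' : (pvNameEnd expr start).toNat + 1 = (start + ((PySem.Chars.find (expr.drop start) pvNeedle).toNat + pvNeedle.length)) + (PySem.Chars.find (expr.drop (start + ((PySem.Chars.find (expr.drop start) pvNeedle).toNat + pvNeedle.length))) [')']).toNat + 1 := by
        rw [hNE']; omega
      have hq22 : (expr.drop (start + ((PySem.Chars.find (expr.drop start) pvNeedle).toNat + pvNeedle.length))).drop ((PySem.Chars.find (expr.drop (start + ((PySem.Chars.find (expr.drop start) pvNeedle).toNat + pvNeedle.length))) [')']).toNat + [')'].length)
          = expr.drop ((start + ((PySem.Chars.find (expr.drop start) pvNeedle).toNat + pvNeedle.length)) + (PySem.Chars.find (expr.drop (start + ((PySem.Chars.find (expr.drop start) pvNeedle).toNat + pvNeedle.length))) [')']).toNat + 1) := by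
        rw [List.drop_drop]; congr 1
      rw [hsl, hq22]
      have hrec := pv_loop_eq expr ((start + ((PySem.Chars.find (expr.drop start) pvNeedle).toNat + pvNeedle.length)) + (PySem.Chars.find (expr.drop (start + ((PySem.Chars.find (expr.drop start) pvNeedle).toNat + pvNeedle.length))) [')']).toNat + 1) (by omega)
        (PySem.Set.add refs (String.ofList (PySem.Chars.strip ((expr.drop (start + ((PySem.Chars.find (expr.drop start) pvNeedle).toNat + pvNeedle.length))).take (PySem.Chars.find (expr.drop (start + ((PySem.Chars.find (expr.drop start) pvNeedle).toNat + pvNeedle.length))) [')']).toNat))))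
      rw [← hrec]
      congr 1
termination_by expr.length + 1 - start
decreasing_by omega

-- ===== VERDICT (by name: the statement is the Claim_ definition above) =====
theorem period_variable_refs_py_spec : Claim_equal_period_variable_refs_py := by
  intro expr _ _
  unfold Spec_period_variable_refs_py period_variable_refs_py period_variable_refs_py_alt
  simpa using pv_loop_eq expr.toList 0 (Nat.zero_le _) PySem.Set.empty
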